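-- pv_equiv track=rewrite | github.com/domenicvacanti/Introduction-to-Computer-Science | Project/LABEXAM3AB.py | problem2
-- ===== SOURCE A (Python) =====
-- def problem2(aString):
--     counter = -1
--     turnCounter = 0
--     missingNum = (((len(aString)-1)//2)+1)
--     newString = aString[0]
--     while turnCounter < (len(aString)-2):
--         newString += aString[counter]
--         counter = counter * -1
--         turnCounter = turnCounter + 1
--         newString += aString[counter]
--         counter = (counter + 1) * -1
--         turnCounter = turnCounter + 1
--     if len(aString) % 2 == 0:
--         newString += aString[missingNum]
--     return newString
-- ===== SOURCE B (Python) =====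
-- def problem2(aString):
--     n = len(aString)
--     mid = (n + 1) // 2
--     front_rest = aString[1:mid]
--     back = aString[mid:][::-1]
--     out = [aString[0]]
--     for i in range(len(back)):
--         out.append(back[i])
--         if i < len(front_rest):
--             out.append(front_rest[i])
--     return ''.join(out)
-- ===== Notes on version B (the rewrite author's own statement) =====
-- stated objective: faster
-- what changed: A builds the result via a signed-index ping-pong while loop with quadratic string concatenation; B splits the string into first char, rest-of-front-half and reversed back half and interleaves them into a list joined once (O(n)).
import Mathlib
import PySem

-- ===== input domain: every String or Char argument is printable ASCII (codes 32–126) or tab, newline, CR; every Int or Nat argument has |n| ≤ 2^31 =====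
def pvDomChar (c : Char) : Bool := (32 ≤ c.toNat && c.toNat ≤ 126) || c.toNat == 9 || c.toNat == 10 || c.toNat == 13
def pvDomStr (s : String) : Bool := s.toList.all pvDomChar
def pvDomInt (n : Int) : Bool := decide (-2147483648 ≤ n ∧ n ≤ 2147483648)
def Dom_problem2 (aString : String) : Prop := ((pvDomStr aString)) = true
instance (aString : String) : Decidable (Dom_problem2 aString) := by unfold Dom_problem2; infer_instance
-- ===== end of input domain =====

-- B replaces A's signed-index ping-pong while loop (quadratic string concatenation) by a split-into-halves / reverse / interleave pass joined once (objective: faster, measured).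
-- Both Pythons raise IndexError on the empty string only; Pre_ excludes exactly that input.

-- ===== PORT A =====
-- the while loop of A, one recursive step per iteration; fuel bounds the iteration count
-- (a pyGet? miss (IndexError) contributes nothing — such inputs lie outside Pre_)
def problem2Loop (cs : List Char) (counter turnCounter : Int) (acc : List Char) : Nat → List Char
  | 0 => acc
  | fuel+1 =>
    if turnCounter < (cs.length : Int) - 2 then
      let acc1 := acc ++ (PySem.List.pyGet? cs counter).toList
      let counter1 := counter * -1
      let turn1 := turnCounter + 1
      let acc2 := acc1 ++ (PySem.List.pyGet? cs counter1).toList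
      let counter2 := (counter1 + 1) * -1
      problem2Loop cs counter2 (turn1 + 1) acc2 fuel
    else acc

def problem2 (aString : String) : String :=
  let cs := aString.toList
  let missingNum : Int := PySem.Int.floordiv ((cs.length : Int) - 1) 2 + 1
  let newString := (PySem.List.pyGet? cs 0).toList
  let newString := problem2Loop cs (-1) 0 newString cs.length
  let newString :=
    if PySem.Int.mod (cs.length : Int) 2 = 0 then
      newString ++ (PySem.List.pyGet? cs missingNum).toList
    else newString
  String.ofList newString

-- ===== PORT B =====
def problem2_alt (aString : String) : String :=
  let cs := aString.toList
  let n : Int := cs.length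
  let mid := PySem.Int.floordiv (n + 1) 2
  let frontRest := PySem.List.slice cs (some 1) (some mid)
  let back := (PySem.List.slice? (PySem.List.slice cs (some mid) none) none none (-1)).getD []
  let out := (PySem.List.pyGet? cs 0).toList
  let out := (PySem.List.pyRange 0 (back.length : Int) 1).foldl (fun acc i =>
      let acc := acc ++ (PySem.List.pyGet? back i).toList
      if i < (frontRest.length : Int) then acc ++ (PySem.List.pyGet? frontRest i).toList else acc) out
  String.ofList out

-- ===== PRECONDITION & SPEC =====
-- both programs raise IndexError on the empty string (aString[0]); that is the only raising input
def Pre_problem2 (aString : String) : Prop := aString ≠ ""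
instance (aString : String) : Decidable (Pre_problem2 aString) := by unfold Pre_problem2; infer_instance
def pvWitness_problem2 : String := "abcde"
def Spec_problem2 (aString : String) (out : String) : Prop := out = problem2_alt aString
instance (aString : String) (out : String) : Decidable (Spec_problem2 aString out) := by unfold Spec_problem2; infer_instance

-- ===== CLAIM (what is proved, stated in full; the proofs are below) =====
def Claim_equal_problem2 : Prop := ∀ (aString : String), Dom_problem2 aString → Pre_problem2 aString → Spec_problem2 aString (problem2 aString)

-- ===== LEMMAS AND PROOFS =====

theorem loopA_eq (cs : List Char) :
    ∀ (m k : Nat) (acc : List Char) (fuel : Nat), 1 ≤ k →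
    m = (cs.length - 1) / 2 + 1 - k → m ≤ fuel →
    problem2Loop cs (-(k:Int)) (2*((k:Int)-1)) acc fuel =
      acc ++ (List.range m).flatMap
        (fun j => (cs[cs.length - (k+j)]?).toList ++ (cs[k+j]?).toList) := by
  intro m
  induction m with
  | zero =>
    intro k acc fuel hk hm _
    cases fuel with
    | zero => simp [problem2Loop]
    | succ f =>
      simp only [problem2Loop, List.range_zero, List.flatMap_nil, List.append_nil]
      rw [if_neg]
      omega
  | succ m ih =>
    intro k acc fuel hk hm hf
    cases fuel with
    | zero => omega
    | succ f =>
      have hkn : k ≤ cs.length := by omega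
      simp only [problem2Loop]
      rw [if_pos (by omega)]
      rw [PySem.List.pyGet?_neg_natCast cs k (by omega) hkn]
      have h1 : (-(k:Int)) * -1 = ((k:Nat):Int) := by ring
      rw [h1, PySem.List.pyGet?_natCast cs k]
      have h2 : ((k:Int) + 1) * -1 = -(((k+1:Nat)):Int) := by push_cast; ring
      have h3 : 2*((k:Int)-1) + 1 + 1 = 2*((((k+1:Nat)):Int)-1) := by push_cast; ring
      rw [h2, h3, ih (k+1) _ f (by omega) (by omega) (by omega)]
      rw [List.range_succ_eq_map, List.flatMap_cons, List.flatMap_map]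
      simp only [List.append_assoc, Nat.add_zero]
      congr 4
      funext j
      have e1 : k + j.succ = k + 1 + j := by omega
      rw [e1]


-- B's interleaving loop as a flatMap
theorem altLoop_eq (back front : List Char) (out : List Char) :
    List.foldl (fun acc i =>
      if i < (front.length : Int) then
        acc ++ (PySem.List.pyGet? back i).toList ++ (PySem.List.pyGet? front i).toList
      else acc ++ (PySem.List.pyGet? back i).toList) out (PySem.List.pyRange 0 (back.length : Int) 1)
    = out ++ (List.range back.length).flatMap
        (fun j => (back[j]?).toList ++ if j < front.length then (front[j]?).toList else []) := by
  rw [PySem.List.pyRange_zero_natCast, List.foldl_map]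
  rw [PySem.List.foldl_congr_mem _ _
      (fun acc j => acc ++ ((back[j]?).toList ++ if j < front.length then (front[j]?).toList else [])) _ ?_]
  · rw [PySem.List.foldl_append_eq_flatMap]
  · intro acc j _
    simp only [PySem.List.pyGet?_natCast]
    split_ifs with h1 h2 h2 <;> simp_all


-- pointwise identity: B's (back,front) pair at j is A's (s[-(j+1)], s[j+1]) pair
theorem pair_eq (cs : List Char) (j : Nat) (hj : j < cs.length - (cs.length+1)/2) :
    (List.drop ((cs.length+1)/2) cs).reverse[j]?.toList ++
      (if j < (List.take ((cs.length+1)/2 - 1) (List.drop 1 cs)).length then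
        (List.take ((cs.length+1)/2 - 1) (List.drop 1 cs))[j]?.toList else [])
    = cs[cs.length - (1+j)]?.toList ++
      (if j < (cs.length+1)/2 - 1 then cs[1+j]?.toList else []) := by
  have hlb : (List.drop ((cs.length+1)/2) cs).length = cs.length - (cs.length+1)/2 := by
    simp
  have h1 : (List.drop ((cs.length+1)/2) cs).reverse[j]? = cs[cs.length - (1+j)]? := by
    rw [List.getElem?_reverse (by omega), hlb, List.getElem?_drop]
    congr 1
    omega
  have hlf : (List.take ((cs.length+1)/2 - 1) (List.drop 1 cs)).length = (cs.length+1)/2 - 1 := by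
    simp
    omega
  rw [h1, hlf]
  congr 1
  split_ifs with h
  · rw [List.getElem?_take, if_pos h, List.getElem?_drop]
  · rfl

theorem interleave_core (cs : List Char) (hn : 1 ≤ cs.length) :
    (if cs.length % 2 = 0 then
      cs[0]?.toList ++ (List.range ((cs.length-1)/2)).flatMap
        (fun j => cs[cs.length - (1+j)]?.toList ++ cs[1+j]?.toList) ++ cs[(cs.length-1)/2 + 1]?.toList
    else
      cs[0]?.toList ++ (List.range ((cs.length-1)/2)).flatMap
        (fun j => cs[cs.length - (1+j)]?.toList ++ cs[1+j]?.toList))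
    = cs[0]?.toList ++ (List.range (List.drop ((cs.length+1)/2) cs).reverse.length).flatMap
        (fun j => (List.drop ((cs.length+1)/2) cs).reverse[j]?.toList ++
          if j < (List.take ((cs.length+1)/2 - 1) (List.drop 1 cs)).length then
            (List.take ((cs.length+1)/2 - 1) (List.drop 1 cs))[j]?.toList else []) := by
  have hlenb : (List.drop ((cs.length+1)/2) cs).reverse.length = cs.length - (cs.length+1)/2 := by
    simp
  rw [hlenb]
  rw [List.flatMap_congr (fun j hj => pair_eq cs j (by simpa using List.mem_range.mp hj))]
  rcases Nat.mod_two_eq_zero_or_one cs.length with he | ho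
  · rw [if_pos he]
    have hsplit : cs.length - (cs.length+1)/2 = (cs.length-1)/2 + 1 := by omega
    rw [hsplit, List.range_succ, List.flatMap_append, List.flatMap_singleton]
    rw [if_neg (by omega)]
    have hlast : cs.length - (1 + (cs.length-1)/2) = (cs.length-1)/2 + 1 := by omega
    rw [hlast, List.append_nil, ← List.append_assoc]
    congr 2
    apply List.flatMap_congr
    intro j hj
    have hj' := List.mem_range.mp hj
    rw [if_pos (by omega)]
  · rw [if_neg (by omega)]
    have hsplit : cs.length - (cs.length+1)/2 = (cs.length-1)/2 := by omega
    rw [hsplit]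
    congr 1
    apply List.flatMap_congr
    intro j hj
    have hj' := List.mem_range.mp hj
    rw [if_pos (by omega)]

theorem problem2_spec : Claim_equal_problem2 := by
  intro aString _ hpre
  unfold Spec_problem2 problem2 problem2_alt
  have hcs : aString.toList ≠ [] := by
    intro h
    exact hpre (by rw [← String.ofList_toList (s := aString), h])
  set cs := aString.toList with hcsdef
  have hn : 1 ≤ cs.length := List.length_pos_iff.mpr hcs
  have hK := loopA_eq cs ((cs.length-1)/2) 1 ((PySem.List.pyGet? cs 0).toList) cs.length (le_refl 1) (by omega) (by omega)
  norm_num at hK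
  dsimp only
  rw [hK, PySem.List.slice?_none_none_neg_one]
  have hmid : PySem.Int.floordiv ((cs.length:Int) + 1) 2 = (((cs.length+1)/2 : Nat) : Int) := by
    rw [show ((cs.length:Int)+1) = (((cs.length+1 : Nat)):Int) by push_cast; ring,
        show (2:Int) = ((2:Nat):Int) by norm_num, PySem.Int.floordiv_natCast]
  have hmiss : PySem.Int.floordiv ((cs.length:Int) - 1) 2 + 1 = (((cs.length-1)/2 + 1 : Nat) : Int) := by
    rw [show ((cs.length:Int)-1) = (((cs.length-1 : Nat)):Int) by push_cast [hn]; ring,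
        show (2:Int) = ((2:Nat):Int) by norm_num, PySem.Int.floordiv_natCast]
    push_cast; ring
  have hfr : PySem.List.slice cs (some 1) (some ((((cs.length+1)/2 : Nat)):Int)) =
      (cs.drop 1).take ((cs.length+1)/2 - 1) := by
    rw [PySem.List.slice_toNat (ha := by norm_num) (hb := by positivity)]
    simp
    omega
  rw [hmid, hmiss, Option.getD_some, PySem.List.slice_from_natCast, hfr, altLoop_eq]
  rw [show (2:Int) = ((2:Nat):Int) by norm_num, PySem.Int.mod_natCast,
      PySem.List.pyGet?_natCast, PySem.List.pyGet?_zero]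
  simp only [Nat.cast_eq_zero]
  exact congrArg String.ofList (interleave_core cs hn)
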